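-- pv_equiv track=rewrite | github.com/arnor-sigurdsson/EIR | eir/models/input/array/models_cnn.py | _get_cur_dilation
-- ===== SOURCE A (Python) =====
-- def _get_cur_dilation(
--     dilation_factor: int, size: int, block_number: int, kernel_size: int
-- ):
--     """
--     Note that block_number refers to the number of full residual blocks
--     (excluding the first one).
--     """
--     if size == 1 or kernel_size == 1:
--         return 1
--
--     dilation = dilation_factor**block_number
--
--     max_dilation = max(1, (size - 1) // (kernel_size - 1))
--     while dilation > max_dilation:
--         dilation = dilation // dilation_factor
--
--     return dilation
-- ===== SOURCE B (Python) =====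
-- def _get_cur_dilation(
--     dilation_factor: int, size: int, block_number: int, kernel_size: int
-- ):
--     if size == 1 or kernel_size == 1:
--         return 1
--     max_dilation = max(1, (size - 1) // (kernel_size - 1))
--     k = block_number
--     if dilation_factor >= 2:
--         # e = floor(log_{dilation_factor}(max_dilation)), computed by shrinking the cap
--         e = 0
--         m = max_dilation
--         while m >= dilation_factor:
--             m //= dilation_factor
--             e += 1
--         k = min(block_number, e)
--     return dilation_factor ** k
-- ===== Notes on version B (the rewrite author's own statement) =====
-- stated objective: faster
-- what changed: Instead of computing the full power dilation_factor**block_number and dividing it down past the cap, B computes the integer logarithm of the cap (by repeatedly dividing the cap itself by the factor) and returns dilation_factor**min(block_number, log), never materialising the huge intermediate power.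
-- outside the precondition, e.g. on _get_cur_dilation(-2, 20, 6, 3): A returns -32, B returns 64; on _get_cur_dilation(2, 20, -1, 3): A returns 0.5, B returns 0.5
import Mathlib
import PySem

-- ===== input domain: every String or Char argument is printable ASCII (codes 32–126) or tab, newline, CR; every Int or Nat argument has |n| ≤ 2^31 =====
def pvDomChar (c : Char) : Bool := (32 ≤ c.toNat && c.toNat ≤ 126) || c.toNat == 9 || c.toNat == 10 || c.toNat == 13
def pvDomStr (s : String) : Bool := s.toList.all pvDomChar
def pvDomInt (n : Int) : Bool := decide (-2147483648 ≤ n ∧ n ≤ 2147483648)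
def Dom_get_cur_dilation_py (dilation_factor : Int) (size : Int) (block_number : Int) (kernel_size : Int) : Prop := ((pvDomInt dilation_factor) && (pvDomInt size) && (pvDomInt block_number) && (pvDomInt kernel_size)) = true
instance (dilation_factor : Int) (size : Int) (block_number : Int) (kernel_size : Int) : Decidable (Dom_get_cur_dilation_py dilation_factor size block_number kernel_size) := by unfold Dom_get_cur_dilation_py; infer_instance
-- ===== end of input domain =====

-- B replaces A's "compute dilation_factor**block_number, then divide down past the cap" by an
-- integer-logarithm of the cap and one small power, never materialising the huge power (return value only).

-- ===== PORT A =====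
-- A's 'while dilation > max_dilation: dilation //= dilation_factor' as fuelled recursion;
-- inside Pre_ (dilation_factor ≥ 0, block_number ≥ 0) fuel block_number.toNat suffices, since each
-- division removes one factor and dilation_factor**0 = 1 ≤ max_dilation.
def pvWhileDiv (df maxd : Int) : Nat → Int → Int
  | 0, d => d
  | n+1, d => if d > maxd then pvWhileDiv df maxd n (PySem.Int.floordiv d df) else d

def get_cur_dilation_py (dilation_factor : Int) (size : Int) (block_number : Int) (kernel_size : Int) : Int :=
  if size = 1 ∨ kernel_size = 1 then 1
  else
    -- dilation_factor ** block_number; Pre_ has 0 ≤ block_number (Python yields a float otherwise)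
    let dilation := dilation_factor ^ block_number.toNat
    let max_dilation := max 1 (PySem.Int.floordiv (size - 1) (kernel_size - 1))
    pvWhileDiv dilation_factor max_dilation block_number.toNat dilation

-- ===== PORT B =====
-- Source B's 'while m >= dilation_factor: m //= dilation_factor; e += 1': integer log of the cap.
-- Well-founded on m.toNat: the loop body only runs when 2 ≤ df ≤ m, where m // df < m.
def pvILog (df m : Int) : Nat :=
  if h : 2 ≤ df ∧ df ≤ m then pvILog df (PySem.Int.floordiv m df) + 1 else 0
termination_by m.toNat
decreasing_by
  rw [PySem.Int.floordiv_eq_ediv_of_pos (show (0:Int) < df by omega)]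
  have h3 : 0 ≤ m / df := Int.ediv_nonneg (by omega) (by omega)
  have he := Int.ediv_add_emod m df
  have hr := Int.emod_nonneg m (show df ≠ 0 by omega)
  have h4 : 2 * (m / df) ≤ df * (m / df) := by nlinarith
  omega

def get_cur_dilation_py_alt (dilation_factor : Int) (size : Int) (block_number : Int) (kernel_size : Int) : Int :=
  if size = 1 ∨ kernel_size = 1 then 1
  else
    let max_dilation := max 1 (PySem.Int.floordiv (size - 1) (kernel_size - 1))
    let k : Int :=
      if 2 ≤ dilation_factor then min block_number (pvILog dilation_factor max_dilation : Int)
      else block_number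
    dilation_factor ^ k.toNat

-- ===== PRECONDITION & SPEC =====
-- Pre_ excludes block_number < 0, where Python A returns a float (or raises ZeroDivisionError when
-- dilation_factor = 0) instead of an int, and dilation_factor < 0, where A's divide-down cap yields
-- sign-alternating accidental values that no specification of a CNN dilation would pin down.
def Pre_get_cur_dilation_py (dilation_factor : Int) (size : Int) (block_number : Int) (kernel_size : Int) : Prop :=
  0 ≤ dilation_factor ∧ 0 ≤ block_number
instance (dilation_factor : Int) (size : Int) (block_number : Int) (kernel_size : Int) : Decidable (Pre_get_cur_dilation_py dilation_factor size block_number kernel_size) := by unfold Pre_get_cur_dilation_py; infer_instance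

def pvWitness_get_cur_dilation_py : Int × Int × Int × Int := (2, 10, 3, 3)

def Spec_get_cur_dilation_py (dilation_factor : Int) (size : Int) (block_number : Int) (kernel_size : Int) (out : Int) : Prop := out = get_cur_dilation_py_alt dilation_factor size block_number kernel_size
instance (dilation_factor : Int) (size : Int) (block_number : Int) (kernel_size : Int) (out : Int) : Decidable (Spec_get_cur_dilation_py dilation_factor size block_number kernel_size out) := by unfold Spec_get_cur_dilation_py; infer_instance

-- ===== CLAIM (what is proved, stated in full; the proofs are below) =====
def Claim_equal_get_cur_dilation_py : Prop := ∀ (dilation_factor : Int) (size : Int) (block_number : Int) (kernel_size : Int), Dom_get_cur_dilation_py dilation_factor size block_number kernel_size → Pre_get_cur_dilation_py dilation_factor size block_number kernel_size → Spec_get_cur_dilation_py dilation_factor size block_number kernel_size (get_cur_dilation_py dilation_factor size block_number kernel_size)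

-- ===== LEMMAS AND PROOFS =====

-- capK df maxd n = the largest k ≤ n with df^k ≤ maxd (for monotone powers); proof-only helper.
def capK (df maxd : Int) : Nat → Nat
  | 0 => 0
  | n+1 => if df ^ (n+1) ≤ maxd then n+1 else capK df maxd n

theorem pvWhileDiv_of_le {df maxd d : Int} (h : d ≤ maxd) (f : Nat) :
    pvWhileDiv df maxd f d = d := by
  cases f <;> simp [pvWhileDiv, not_lt.mpr h]

theorem capK_of_le {df maxd : Int} (j : Nat) (h : df ^ j ≤ maxd) :
    capK df maxd j = j := by
  cases j with
  | zero => rfl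
  | succ m => simp [capK, h]

theorem pow_mono_int {df : Int} (hdf : 1 ≤ df) {a b : Nat} (h : a ≤ b) :
    df ^ a ≤ df ^ b := pow_le_pow_right₀ hdf h

theorem capK_stable {df maxd : Int} (hdf : 1 ≤ df) (j : Nat)
    (hle : df ^ j ≤ maxd) (hgt : maxd < df ^ (j+1)) :
    ∀ N, j ≤ N → capK df maxd N = j := by
  intro N
  induction N with
  | zero => intro h; interval_cases j; rfl
  | succ M ih =>
    intro h
    rcases Nat.lt_or_ge M.succ j.succ with h1 | h1
    · have : j = M + 1 := by omega
      subst this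
      simp [capK, hle]
    · have hj : j ≤ M := by omega
      have : ¬ df ^ (M+1) ≤ maxd := by
        have := pow_mono_int hdf (show j + 1 ≤ M + 1 by omega)
        omega
      simp [capK, this, ih hj]

theorem pvWhileDiv_pow {df maxd : Int} (hdf : 1 ≤ df) (hm : 1 ≤ maxd) :
    ∀ k f, k ≤ f → pvWhileDiv df maxd f (df ^ k) = df ^ (capK df maxd k) := by
  intro k
  induction k with
  | zero =>
    intro f _
    rw [pow_zero, pvWhileDiv_of_le hm]
    simp [capK]
  | succ m ih =>
    intro f hf
    obtain ⟨f', rfl⟩ : ∃ f', f = f' + 1 := ⟨f - 1, by omega⟩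
    by_cases h : df ^ (m+1) ≤ maxd
    · rw [pvWhileDiv_of_le h, capK_of_le _ h]
    · have hpos : (0:Int) < df := by omega
      have hdiv : PySem.Int.floordiv (df ^ (m+1)) df = df ^ m := by
        rw [PySem.Int.floordiv_eq_ediv_of_pos hpos, pow_succ, Int.mul_ediv_cancel _ (by omega)]
      have : pvWhileDiv df maxd (f'+1) (df ^ (m+1))
          = pvWhileDiv df maxd f' (PySem.Int.floordiv (df ^ (m+1)) df) := by
        simp [pvWhileDiv, lt_of_not_ge h]
      rw [this, hdiv, ih f' (by omega)]
      simp [capK, h]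

-- pvILog really is the integer logarithm: df^(pvILog df m) ≤ m < df^(pvILog df m + 1).
theorem pvILog_spec {df : Int} (hdf : 2 ≤ df) :
    ∀ (n : Nat) (m : Int), m.toNat = n → 1 ≤ m →
      df ^ (pvILog df m) ≤ m ∧ m < df ^ (pvILog df m + 1) := by
  intro n
  induction n using Nat.strong_induction_on with
  | _ n ih =>
    intro m hmn hm
    by_cases h : df ≤ m
    · have hpos : (0:Int) < df := by omega
      have hq1 : (1:Int) ≤ m / df := (Int.le_ediv_iff_mul_le hpos).mpr (by omega)
      have hdnn : (0:Int) ≤ m / df := Int.ediv_nonneg (by omega) (by omega)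
      have he' := Int.ediv_add_emod m df
      have hr' := Int.emod_nonneg m (show df ≠ 0 by omega)
      have h4' : 2 * (m / df) ≤ df * (m / df) := by nlinarith
      have hlt : m / df < m := by omega
      have hdiveq : PySem.Int.floordiv m df = m / df := PySem.Int.floordiv_eq_ediv_of_pos hpos
      obtain ⟨ha, hb⟩ := ih (m / df).toNat (by omega) (m / df) rfl hq1
      have heq : pvILog df m = pvILog df (m / df) + 1 := by
        rw [pvILog, dif_pos ⟨hdf, h⟩, hdiveq]
      rw [heq]
      have hmod := Int.ediv_add_emod m df
      have hmodnn := Int.emod_nonneg m (show df ≠ 0 by omega)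
      have hmodlt := Int.emod_lt_of_pos m hpos
      have hpe : (0:Int) ≤ df ^ (pvILog df (m / df)) := by positivity
      constructor
      · have hps : df ^ (pvILog df (m / df) + 1) = df ^ (pvILog df (m / df)) * df :=
          pow_succ df _
        nlinarith [ha]
      · have hps : df ^ (pvILog df (m / df) + 1 + 1) = df ^ (pvILog df (m / df) + 1) * df :=
          pow_succ df _
        nlinarith [hb]
    · have heq : pvILog df m = 0 := by
        rw [pvILog, dif_neg]
        intro hh
        exact h hh.2
      rw [heq]
      constructor
      · simpa using hm
      · simpa using (show m < df by omega)

-- The cut-off exponent of A's divide-down equals min(n, integer log of the cap).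
theorem capK_eq_min {df maxd : Int} (hdf : 2 ≤ df) (hm : 1 ≤ maxd) (n : Nat) :
    capK df maxd n = min n (pvILog df maxd) := by
  obtain ⟨ha, hb⟩ := pvILog_spec hdf maxd.toNat maxd rfl hm
  by_cases h : n ≤ pvILog df maxd
  · rw [capK_of_le n (le_trans (pow_mono_int (by omega) h) ha), min_eq_left h]
  · push_neg at h
    rw [capK_stable (by omega) (pvILog df maxd) ha hb n (by omega), min_eq_right (by omega)]

-- ===== VERDICT (by name: the statement is the Claim_ definition above) =====
theorem get_cur_dilation_py_spec : Claim_equal_get_cur_dilation_py := by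
  intro df size bn ks _ hpre
  obtain ⟨hdf, hbn⟩ := hpre
  unfold Spec_get_cur_dilation_py get_cur_dilation_py get_cur_dilation_py_alt
  by_cases hsz : size = 1 ∨ ks = 1
  · simp [hsz]
  · simp only [if_neg hsz]
    set maxd := max 1 (PySem.Int.floordiv (size - 1) (ks - 1)) with hmaxd
    have hm : (1:Int) ≤ maxd := le_max_left _ _
    by_cases h2 : 2 ≤ df
    · simp only [if_pos h2]
      rw [pvWhileDiv_pow (by omega) hm bn.toNat bn.toNat le_rfl, capK_eq_min h2 hm bn.toNat]
      congr 1
      omega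
    · simp only [if_neg h2]
      rcases (show df = 0 ∨ df = 1 by omega) with h0 | h1
      · subst h0
        have hle : (0:Int) ^ bn.toNat ≤ maxd := by
          rcases hnn : bn.toNat with _ | t
          · simpa using hm
          · simp
            omega
        rw [pvWhileDiv_of_le hle]
      · subst h1
        rw [one_pow, pvWhileDiv_of_le hm]
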